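-- pv_equiv track=rewrite | github.com/Meteorych/LOIS1Lab | main.py | rule_to_machine
-- ===== SOURCE A (Python) =====
-- def rule_to_machine(user_rule):
--     result = ""
--     for sign in range(len(user_rule)):
--         if user_rule[sign] == '~':
--             result += "@"
--         elif user_rule[sign] == '>':
--             pass
--         else:
--             result += user_rule[sign]
--     return result
-- ===== SOURCE B (Python) =====
-- def rule_to_machine(user_rule):
--     # staged string-rewriting passes over separator-free segments:
--     # pass 1 deletes every '>' (split on '>' and glue the pieces),
--     # pass 2 rewrites every '~' to '@' (split on '~' and join with '@')
--     without_gt = "".join(user_rule.split('>'))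
--     return "@".join(without_gt.split('~'))
-- ===== Notes on version B (the rewrite author's own statement) =====
-- stated objective: faster
-- what changed: Replaced the indexed per-character loop with its if/elif/else cascade and repeated string concatenation by two staged split/join string-rewriting passes: split on '>' glued with '' to delete it, then split on '~' joined with '@' to rewrite it.
import Mathlib
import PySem

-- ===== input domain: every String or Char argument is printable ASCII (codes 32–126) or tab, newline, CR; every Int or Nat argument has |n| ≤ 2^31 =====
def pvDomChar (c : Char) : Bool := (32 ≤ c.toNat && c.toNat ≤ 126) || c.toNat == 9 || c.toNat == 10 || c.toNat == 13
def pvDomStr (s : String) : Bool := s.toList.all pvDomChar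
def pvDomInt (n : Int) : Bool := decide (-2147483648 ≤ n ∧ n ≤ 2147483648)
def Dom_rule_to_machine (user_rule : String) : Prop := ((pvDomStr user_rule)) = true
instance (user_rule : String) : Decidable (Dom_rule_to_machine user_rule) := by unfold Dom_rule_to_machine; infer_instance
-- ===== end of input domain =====

-- B replaces A's indexed per-character loop with two staged split/join passes
-- (split on '>' glued with '', then split on '~' joined with '@') — alternative decomposition.

-- ===== PORT A =====
def rule_to_machine (user_rule : String) : String :=
  String.ofList ((PySem.List.pyRange 0 (PySem.Str.len user_rule) 1).foldl
    (fun result sign =>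
      match PySem.Str.pyGet? user_rule sign with
      | some c => if c = '~' then result ++ ['@'] else if c = '>' then result else result ++ [c]
      | none => result) [])

-- ===== PORT B =====
-- s.split(sep) for a nonempty sep is PySem.Chars.splitOn on the code points (no Str-level wrapper exists)
def rule_to_machine_alt (user_rule : String) : String :=
  let without_gt : String :=
    PySem.Str.join "" ((PySem.Chars.splitOn user_rule.toList ['>']).map String.ofList)
  PySem.Str.join "@" ((PySem.Chars.splitOn without_gt.toList ['~']).map String.ofList)

-- ===== PRECONDITION & SPEC =====
def Spec_rule_to_machine (user_rule : String) (out : String) : Prop := out = rule_to_machine_alt user_rule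
instance (user_rule : String) (out : String) : Decidable (Spec_rule_to_machine user_rule out) := by unfold Spec_rule_to_machine; infer_instance

-- ===== CLAIM (what is proved, stated in full; the proofs are below) =====
def Claim_equal_rule_to_machine : Prop := ∀ (user_rule : String), Dom_rule_to_machine user_rule → Spec_rule_to_machine user_rule (rule_to_machine user_rule)

-- ===== LEMMAS AND PROOFS =====

-- the segments of l between occurrences of c, with pre prepended to the first segment
def pvSegs (c : Char) (pre : List Char) : List Char → List (List Char)
  | [] => [pre]
  | x :: xs => if x = c then pre :: pvSegs c [] xs else pvSegs c (pre ++ [x]) xs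

-- splitOn.go with a single-char separator computes pvSegs (fuel suffices)
lemma go_single (c : Char) : ∀ (fuel : Nat) (l cur : List Char) (acc : List (List Char)),
    l.length ≤ fuel →
    PySem.Chars.splitOn.go [c] fuel l cur acc = acc.reverse ++ pvSegs c cur.reverse l := by
  intro fuel
  induction fuel with
  | zero =>
    intro l cur acc hl
    have : l = [] := List.length_eq_zero_iff.mp (Nat.le_zero.mp hl)
    subst this
    simp [PySem.Chars.splitOn.go, pvSegs]
  | succ n ih =>
    intro l cur acc hl
    cases l with
    | nil => simp [PySem.Chars.splitOn.go, pvSegs]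
    | cons x xs =>
      rw [PySem.Chars.splitOn.go]
      by_cases hx : x = c
      · have hp : List.isPrefixOf [c] (x :: xs) = true := by simp [List.isPrefixOf, hx]
        rw [if_pos hp]
        have hd : List.drop [c].length (x :: xs) = xs := rfl
        rw [hd, ih xs [] (cur.reverse :: acc) (by simpa using Nat.le_of_succ_le_succ hl)]
        simp [pvSegs, hx]
      · have hp : List.isPrefixOf [c] (x :: xs) = false := by
          simp [List.isPrefixOf]
          intro h; exact absurd h.symm hx
        rw [if_neg (by simp [hp])]
        rw [ih xs (x :: cur) acc (by simpa using Nat.le_of_succ_le_succ hl)]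
        simp [pvSegs, hx]

-- splitOn with a single-char separator is pvSegs
lemma splitOn_single (c : Char) (l : List Char) :
    PySem.Chars.splitOn l [c] = pvSegs c [] l := by
  simpa [PySem.Chars.splitOn] using go_single c (l.length + 1) l [] [] (by omega)

-- the segment list is never empty
lemma pvSegs_ne_nil (c : Char) : ∀ (l pre : List Char), pvSegs c pre l ≠ [] := by
  intro l
  induction l with
  | nil => intro pre; simp [pvSegs]
  | cons x xs ih =>
    intro pre
    by_cases hx : x = c
    · simp [pvSegs, hx]
    · simpa [pvSegs, hx] using ih (pre ++ [x])

-- ''.join of the segments drops every separator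
lemma join_nil_segs (c : Char) : ∀ (l pre : List Char),
    PySem.Chars.join [] (pvSegs c pre l) = pre ++ l.filter (fun x => x != c) := by
  intro l
  induction l with
  | nil => intro pre; simp [pvSegs, PySem.Chars.join_singleton]
  | cons x xs ih =>
    intro pre
    by_cases hx : x = c
    · rw [show pvSegs c pre (x :: xs) = pre :: pvSegs c [] xs by simp [pvSegs, hx]]
      obtain ⟨b, rest, hb⟩ := List.exists_cons_of_ne_nil (pvSegs_ne_nil c xs [])
      rw [hb, PySem.Chars.join_cons_cons, ← hb, ih []]
      simp [hx]
    · rw [show pvSegs c pre (x :: xs) = pvSegs c (pre ++ [x]) xs by simp [pvSegs, hx]]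
      rw [ih (pre ++ [x])]
      simp [hx]

-- '@'.join of the segments rewrites every separator to '@'
lemma join_at_segs (c r : Char) : ∀ (l pre : List Char),
    PySem.Chars.join [r] (pvSegs c pre l) = pre ++ l.map (fun x => if x = c then r else x) := by
  intro l
  induction l with
  | nil => intro pre; simp [pvSegs, PySem.Chars.join_singleton]
  | cons x xs ih =>
    intro pre
    by_cases hx : x = c
    · rw [show pvSegs c pre (x :: xs) = pre :: pvSegs c [] xs by simp [pvSegs, hx]]
      obtain ⟨b, rest, hb⟩ := List.exists_cons_of_ne_nil (pvSegs_ne_nil c xs [])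
      rw [hb, PySem.Chars.join_cons_cons, ← hb, ih []]
      simp [List.map_cons, hx]
    · rw [show pvSegs c pre (x :: xs) = pvSegs c (pre ++ [x]) xs by simp [pvSegs, hx]]
      rw [ih (pre ++ [x])]
      simp [List.map_cons, hx]

-- A's index loop over range(len(s)) equals the direct fold over the characters
lemma fold_idx (s : String) (F : List Char → Char → List Char) :
    (PySem.List.pyRange 0 (PySem.Str.len s) 1).foldl
      (fun result sign =>
        match PySem.Str.pyGet? s sign with
        | some c => F result c
        | none => result) [] = s.toList.foldl F [] := by
  have h1 : (PySem.List.pyRange 0 (PySem.Str.len s) 1).foldl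
      (fun result sign =>
        match PySem.Str.pyGet? s sign with
        | some c => F result c
        | none => result) [] =
      (PySem.List.pyRange 0 (PySem.Str.len s) 1).foldl
      (fun acc j => F acc (PySem.List.pyGetD s.toList j ' ')) [] := by
    apply PySem.List.foldl_congr_mem
    intro acc i hi
    have hmem := (PySem.List.mem_pyRange_one).mp hi
    have h0 : 0 ≤ i := hmem.1
    have hlt' : i.toNat < s.toList.length := by
      have := hmem.2; rw [PySem.Str.len_eq] at this; omega
    have hg : PySem.Str.pyGet? s i = some s.toList[i.toNat] := by
      simp only [PySem.Str.pyGet?, PySem.Chars.pyGet?]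
      rw [PySem.List.pyGet?_of_nonneg s.toList h0]
      exact List.getElem?_eq_getElem hlt'
    have hd : PySem.List.pyGetD s.toList i ' ' = s.toList[i.toNat] := by
      simp only [PySem.List.pyGetD]
      rw [PySem.List.pyGet?_of_nonneg s.toList h0, List.getElem?_eq_getElem hlt']
      rfl
    rw [hg, hd]
  rw [h1, PySem.Str.len_eq]
  exact PySem.List.foldl_pyRange_zero_pyGetD' s.toList ' ' F []

-- A's accumulator fold equals filtering out '>' then mapping '~' to '@'
lemma body_eq (cs : List Char) :
    cs.foldl (fun result c =>
        if c = '~' then result ++ ['@'] else if c = '>' then result else result ++ [c]) [] =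
      (cs.filter (fun x => x != '>')).map (fun x => if x = '~' then '@' else x) := by
  have h : cs.foldl (fun result c =>
      if c = '~' then result ++ ['@'] else if c = '>' then result else result ++ [c]) [] =
      cs.foldl (fun result c =>
        result ++ (if c = '~' then ['@'] else if c = '>' then [] else [c])) [] := by
    apply PySem.List.foldl_congr_mem
    intro acc x _
    split_ifs <;> simp
  rw [h, PySem.List.foldl_append_eq_flatMap]
  simp only [List.nil_append]
  clear h
  induction cs with
  | nil => rfl
  | cons x xs ih =>
    by_cases h1 : x = '~'
    · subst h1; simpa using ih
    · by_cases h2 : x = '>'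
      · subst h2; simpa using ih
      · rw [List.flatMap_cons, List.filter_cons_of_pos (by simpa using h2), List.map_cons]
        simp only [if_neg h1, if_neg h2]
        rw [ih]
        rfl

-- Str.join over ofList-wrapped segments is ofList of the Chars-level join
lemma join_ofList (sep : String) (parts : List (List Char)) :
    PySem.Str.join sep (parts.map String.ofList) = String.ofList (PySem.Chars.join sep.toList parts) := by
  simp only [PySem.Str.join, List.map_map, Function.comp_def, String.toList_ofList,
    List.map_id']

-- B computed in closed form: filter out '>' then map '~' to '@'
lemma alt_eq (s : String) :
    rule_to_machine_alt s =
      String.ofList ((s.toList.filter (fun x => x != '>')).map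
        (fun x => if x = '~' then '@' else x)) := by
  unfold rule_to_machine_alt
  rw [join_ofList "", join_ofList "@",
    show ("".toList : List Char) = [] from rfl,
    splitOn_single '>' s.toList, join_nil_segs, List.nil_append,
    String.toList_ofList, splitOn_single, join_at_segs, List.nil_append,
    String.toList_ofList]

-- ===== VERDICT (by name: the statement is the Claim_ definition above) =====
theorem rule_to_machine_spec : Claim_equal_rule_to_machine := by
  intro s _
  unfold Spec_rule_to_machine rule_to_machine
  rw [fold_idx s (fun result c =>
    if c = '~' then result ++ ['@'] else if c = '>' then result else result ++ [c]), body_eq, alt_eq]
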